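-- pv_equiv track=rewrite | github.com/NormPlum/freeCodeCamp_DailyCodingChallenges | 055.py | classification
-- ===== SOURCE A (Python) =====
-- def classification(temp):
--     ranges = {
--         30000: "O",
--         10000: "B",
--         7500: "A",
--         6000: "F",
--         5200: "G",
--         3700: "K",
--         0: "M",
--     }
--
--     for classification in ranges:
--         if temp >= classification:
--             return ranges[classification]
-- ===== SOURCE B (Python) =====
-- import bisect
--
-- _THRESHOLDS = [0, 3700, 5200, 6000, 7500, 10000, 30000]
-- _LETTERS = ["M", "K", "G", "F", "A", "B", "O"]
--
-- def classification(temp):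
--     i = bisect.bisect_right(_THRESHOLDS, temp) - 1
--     if i < 0:
--         return None
--     return _LETTERS[i]
-- ===== Notes on version B (the rewrite author's own statement) =====
-- stated objective: idiomatic
-- what changed: Replaced the linear scan over a descending dict of thresholds by a binary search (bisect_right) over an ascending threshold list with a parallel letters list.
import Mathlib
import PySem

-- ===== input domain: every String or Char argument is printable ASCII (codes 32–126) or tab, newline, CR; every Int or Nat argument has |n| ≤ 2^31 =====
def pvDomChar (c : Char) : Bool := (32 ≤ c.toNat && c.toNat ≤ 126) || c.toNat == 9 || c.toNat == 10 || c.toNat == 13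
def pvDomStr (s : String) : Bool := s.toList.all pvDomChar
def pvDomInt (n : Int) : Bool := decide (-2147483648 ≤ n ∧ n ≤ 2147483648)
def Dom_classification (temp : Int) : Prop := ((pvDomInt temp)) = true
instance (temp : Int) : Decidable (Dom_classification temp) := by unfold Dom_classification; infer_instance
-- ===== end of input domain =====

-- B replaces A's linear scan over a descending dict by bisect_right on an ascending threshold list (idiomatic).

-- ===== PORT A =====
-- A iterates the dict's keys in insertion order, returning the value at the first key ≤ temp; fall-through returns None.
def classificationLoop (temp : Int) : List (Int × String) → Option String
  | [] => none
  | (k, v) :: rest => if temp ≥ k then some v else classificationLoop temp rest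

def classification (temp : Int) : Option String :=
  classificationLoop temp
    [(30000, "O"), (10000, "B"), (7500, "A"), (6000, "F"), (5200, "G"), (3700, "K"), (0, "M")]

-- ===== PORT B =====
-- literal port of Python's bisect.bisect_right: while lo < hi: mid=(lo+hi)//2; if x < a[mid] then hi=mid else lo=mid+1
def bisectRight (a : List Int) (x : Int) (lo hi : Nat) : Nat :=
  if _h : lo < hi then
    let mid := (lo + hi) / 2
    if x < a.getD mid 0 then bisectRight a x lo mid
    else bisectRight a x (mid + 1) hi
  else lo
termination_by hi - lo
decreasing_by all_goals omega

def bThresholds : List Int := [0, 3700, 5200, 6000, 7500, 10000, 30000]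
def bLetters : List String := ["M", "K", "G", "F", "A", "B", "O"]

def classification_alt (temp : Int) : Option String :=
  let i : Int := (bisectRight bThresholds temp 0 bThresholds.length : Int) - 1
  if i < 0 then none else PySem.List.pyGet? bLetters i

-- ===== PRECONDITION & SPEC =====
def Spec_classification (temp : Int) (out : Option String) : Prop := out = classification_alt temp
instance (temp : Int) (out : Option String) : Decidable (Spec_classification temp out) := by unfold Spec_classification; infer_instance

-- ===== CLAIM (what is proved, stated in full; the proofs are below) =====
def Claim_equal_classification : Prop := ∀ (temp : Int), Dom_classification temp → Spec_classification temp (classification temp)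

-- ===== LEMMAS AND PROOFS =====

theorem bisect_step (a : List Int) (x : Int) (lo hi : Nat) (h : lo < hi) :
    bisectRight a x lo hi =
      if x < a.getD ((lo + hi) / 2) 0 then bisectRight a x lo ((lo + hi) / 2)
      else bisectRight a x ((lo + hi) / 2 + 1) hi := by
  rw [bisectRight]; simp [h]

theorem bisect_base (a : List Int) (x : Int) (lo hi : Nat) (h : ¬ lo < hi) :
    bisectRight a x lo hi = lo := by
  rw [bisectRight]; simp [h]

theorem bisect_eval (x : Int) :
    bisectRight [0, 3700, 5200, 6000, 7500, 10000, 30000] x 0 7 =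
      if x < 6000 then
        if x < 3700 then (if x < 0 then 0 else 1) else (if x < 5200 then 2 else 3)
      else
        if x < 10000 then (if x < 7500 then 4 else 5) else (if x < 30000 then 6 else 7) := by
  rw [bisect_step _ x 0 7 (by norm_num)]
  norm_num [List.getD]
  by_cases c1 : x < 6000
  · rw [if_pos c1, if_pos c1, bisect_step _ x 0 3 (by norm_num)]
    norm_num [List.getD]
    by_cases c2 : x < 3700
    · rw [if_pos c2, if_pos c2, bisect_step _ x 0 1 (by norm_num)]
      norm_num [List.getD]
      by_cases c3 : x < 0
      · rw [if_pos c3, if_pos c3, bisect_base _ x 0 0 (by norm_num)]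
      · rw [if_neg c3, if_neg c3, bisect_base _ x 1 1 (by norm_num)]
    · rw [if_neg c2, if_neg c2, bisect_step _ x 2 3 (by norm_num)]
      norm_num [List.getD]
      by_cases c3 : x < 5200
      · rw [if_pos c3, if_pos c3, bisect_base _ x 2 2 (by norm_num)]
      · rw [if_neg c3, if_neg c3, bisect_base _ x 3 3 (by norm_num)]
  · rw [if_neg c1, if_neg c1, bisect_step _ x 4 7 (by norm_num)]
    norm_num [List.getD]
    by_cases c2 : x < 10000
    · rw [if_pos c2, if_pos c2, bisect_step _ x 4 5 (by norm_num)]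
      norm_num [List.getD]
      by_cases c3 : x < 7500
      · rw [if_pos c3, if_pos c3, bisect_base _ x 4 4 (by norm_num)]
      · rw [if_neg c3, if_neg c3, bisect_base _ x 5 5 (by norm_num)]
    · rw [if_neg c2, if_neg c2, bisect_step _ x 6 7 (by norm_num)]
      norm_num [List.getD]
      by_cases c3 : x < 30000
      · rw [if_pos c3, if_pos c3, bisect_base _ x 6 6 (by norm_num)]
      · rw [if_neg c3, if_neg c3, bisect_base _ x 7 7 (by norm_num)]

-- ===== VERDICT (by name: the statement is the Claim_ definition above) =====
theorem classification_spec : Claim_equal_classification := by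
  intro temp _
  unfold Spec_classification classification_alt classification
  simp only [classificationLoop, bThresholds, bLetters, List.length_cons, List.length_nil]
  rw [bisect_eval temp]
  split_ifs <;>
    first
      | omega
      | (norm_num [PySem.List.pyGet?, PySem.List.pyIdx?] ; try decide)
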